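-- pv_equiv track=rewrite | github.com/MaxwellMarcus/CalendarGUI | google_calendar.py | get_hours_and_minutes
-- ===== SOURCE A (Python) =====
-- def get_hours_and_minutes(t):
--     hours = ''
--     in_hours = True
--     minutes = ''
--     in_minutes = False
--     for i in t:
--         if i == ':':
--             in_minutes = True
--             if not in_hours:
--                 in_minutes = False
--             in_hours = False
--         if in_hours:
--             hours += i
--         if in_minutes and not i == ':':
--             minutes += i
--
--     if int(hours) > 12:
--         hours = str(int(hours)-12)
--         minutes += ' PM'
--     else:
--         minutes += ' AM'
--
--     time = hours+':'+minutes
--     return time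
-- ===== SOURCE B (Python) =====
-- def get_hours_and_minutes(t):
--     parts = t.split(':')
--     hours = parts[0]
--     minutes = parts[1] if len(parts) > 1 else ''
--     h = int(hours)
--     if h > 12:
--         return str(h - 12) + ':' + minutes + ' PM'
--     return hours + ':' + minutes + ' AM'
-- ===== Notes on version B (the rewrite author's own statement) =====
-- stated objective: idiomatic
-- what changed: Replaces the character-by-character scan with four boolean state flags by a single split on the colon separator, taking the first part as hours and the second part (when present) as minutes, then the same 12-hour arithmetic.
import Mathlib
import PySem

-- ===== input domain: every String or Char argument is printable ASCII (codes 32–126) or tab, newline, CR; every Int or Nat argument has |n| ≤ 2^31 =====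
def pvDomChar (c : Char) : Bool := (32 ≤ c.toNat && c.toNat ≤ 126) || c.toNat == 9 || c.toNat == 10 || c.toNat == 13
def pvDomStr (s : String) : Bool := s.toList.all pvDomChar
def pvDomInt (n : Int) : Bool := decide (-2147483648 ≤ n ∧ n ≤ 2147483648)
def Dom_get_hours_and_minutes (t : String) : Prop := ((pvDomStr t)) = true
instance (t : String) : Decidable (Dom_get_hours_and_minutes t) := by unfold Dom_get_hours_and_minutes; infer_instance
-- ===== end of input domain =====

-- B replaces A's character-by-character scan with boolean state flags by one split(':');
-- same return value on every input where A returns (Pre_ excludes the inputs where int(hours) raises ValueError).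


-- ===== PORT A =====
-- one loop iteration of A: state (hours, in_hours, minutes, in_minutes)
def pvStepA (s : List Char × Bool × List Char × Bool) (i : Char) : List Char × Bool × List Char × Bool :=
  let (hours, in_hours, minutes, in_minutes) := s
  -- if i == ':': in_minutes = True; if not in_hours: in_minutes = False; in_hours = False
  let in_minutes := if i = ':' then (if ¬ in_hours then false else true) else in_minutes
  let in_hours := if i = ':' then false else in_hours
  -- if in_hours: hours += i
  let hours := if in_hours then hours ++ [i] else hours
  -- if in_minutes and not i == ':': minutes += i
  let minutes := if in_minutes ∧ ¬ i = ':' then minutes ++ [i] else minutes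
  (hours, in_hours, minutes, in_minutes)

def get_hours_and_minutes (t : String) : String :=
  let st := t.toList.foldl pvStepA ([], true, [], false)
  let hours := st.1
  let minutes := st.2.2.1
  match PySem.Int.ofChars? hours with
  | none => ""   -- Python raises ValueError here; excluded by Pre_
  | some h =>
    if h > 12 then String.ofList (PySem.Int.toChars (h - 12) ++ [':'] ++ (minutes ++ " PM".toList))
    else String.ofList (hours ++ [':'] ++ (minutes ++ " AM".toList))

-- ===== PORT B =====
def get_hours_and_minutes_alt (t : String) : String :=
  let parts := PySem.Chars.splitOn t.toList [':']
  let hours := parts.getD 0 []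
  let minutes := if 1 < parts.length then parts.getD 1 [] else []
  match PySem.Int.ofChars? hours with
  | none => ""   -- Python raises ValueError here; excluded by Pre_
  | some h =>
    if h > 12 then String.ofList (PySem.Int.toChars (h - 12) ++ [':'] ++ (minutes ++ " PM".toList))
    else String.ofList (hours ++ [':'] ++ (minutes ++ " AM".toList))

-- ===== PRECONDITION & SPEC =====
-- Pre_ excludes exactly the inputs where int() of the hours part (everything before the first colon) fails: there Python A raises ValueError.
def Pre_get_hours_and_minutes (t : String) : Prop :=
  PySem.Int.ofChars? (t.toList.takeWhile (· ≠ ':')) ≠ none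
instance (t : String) : Decidable (Pre_get_hours_and_minutes t) := by
  unfold Pre_get_hours_and_minutes; infer_instance
def pvWitness_get_hours_and_minutes : String := "13:45"

def Spec_get_hours_and_minutes (t : String) (out : String) : Prop := out = get_hours_and_minutes_alt t
instance (t : String) (out : String) : Decidable (Spec_get_hours_and_minutes t out) := by unfold Spec_get_hours_and_minutes; infer_instance

-- ===== CLAIM (what is proved, stated in full; the proofs are below) =====
def Claim_equal_get_hours_and_minutes : Prop := ∀ (t : String), Dom_get_hours_and_minutes t → Pre_get_hours_and_minutes t → Spec_get_hours_and_minutes t (get_hours_and_minutes t)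

-- ===== LEMMAS AND PROOFS =====

-- the tail segments produced by split(':') after the first segment
def pvTail : List Char → List (List Char)
  | [] => []
  | _ :: r => r.takeWhile (· ≠ ':') :: pvTail (r.dropWhile (· ≠ ':'))
termination_by l => l.length
decreasing_by
  simp only [List.length_cons]
  exact Nat.lt_succ_of_le (List.length_dropWhile_le _ _)

lemma pvGo_char (fuel : Nat) : ∀ (l cur : List Char) (accs : List (List Char)),
    l.length < fuel →
    PySem.Chars.splitOn.go [':'] fuel l cur accs =
      accs.reverse ++ (cur.reverse ++ l.takeWhile (· ≠ ':')) :: pvTail (l.dropWhile (· ≠ ':')) := by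
  induction fuel with
  | zero => intro l cur accs h; omega
  | succ fuel ih =>
    intro l cur accs h
    cases l with
    | nil => simp [PySem.Chars.splitOn.go, pvTail]
    | cons c r =>
      by_cases hc : c = ':'
      · rw [PySem.Chars.splitOn.go]
        simp [hc, List.isPrefixOf, ih r [] (cur.reverse :: accs) (by simp at h ⊢; omega), pvTail]
      · rw [PySem.Chars.splitOn.go]
        simp [List.isPrefixOf, Ne.symm hc, hc, ih r (c :: cur) accs (by simp at h ⊢; omega)]

lemma pvSplitOn_char (l : List Char) :
    PySem.Chars.splitOn l [':'] =
      l.takeWhile (· ≠ ':') :: pvTail (l.dropWhile (· ≠ ':')) := by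
  rw [PySem.Chars.splitOn, pvGo_char _ _ _ _ (by omega)]
  simp

lemma pvFoldD (l : List Char) (h m : List Char) :
    l.foldl pvStepA (h, false, m, false) = (h, false, m, false) := by
  induction l with
  | nil => rfl
  | cons c l ih => by_cases hc : c = ':' <;> simp [pvStepA, hc, ih]

lemma pvFoldM (l : List Char) (h m : List Char) :
    l.foldl pvStepA (h, false, m, true) =
      (h, false, m ++ l.takeWhile (· ≠ ':'), (l.dropWhile (· ≠ ':')).isEmpty) := by
  induction l generalizing m with
  | nil => simp
  | cons c l ih =>
    by_cases hc : c = ':'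
    · simp [pvStepA, hc, pvFoldD]
    · simp [pvStepA, hc, ih]

lemma pvFoldH (l : List Char) (h m : List Char) :
    l.foldl pvStepA (h, true, m, false) =
      (h ++ l.takeWhile (· ≠ ':'),
       (l.dropWhile (· ≠ ':')).isEmpty,
       m ++ (match l.dropWhile (· ≠ ':') with | [] => [] | _ :: r => r.takeWhile (· ≠ ':')),
       (match l.dropWhile (· ≠ ':') with | [] => false | _ :: r => (r.dropWhile (· ≠ ':')).isEmpty)) := by
  induction l generalizing h with
  | nil => simp
  | cons c l ih =>
    by_cases hc : c = ':'
    · simp [pvStepA, hc, pvFoldM]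
    · simp [pvStepA, hc, ih]

-- ===== VERDICT (by name: the statement is the Claim_ definition above) =====
theorem get_hours_and_minutes_spec : Claim_equal_get_hours_and_minutes := by
  intro t _ _
  unfold Spec_get_hours_and_minutes get_hours_and_minutes get_hours_and_minutes_alt
  rw [pvFoldH, pvSplitOn_char]
  cases hr : t.toList.dropWhile (· ≠ ':') with
  | nil => simp [pvTail]
  | cons c r => simp [pvTail]
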